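-- pv_equiv track=rewrite | github.com/skpaik/assessment-python-algo | code_signal.py | solution
-- ===== SOURCE A (Python) =====
-- class CustomHashMap:
--     def __init__(self):
--         self.map = {}
--
--     def insert(self, x, y):
--         self.map[x] = y
--
--     def get(self, x):
--         return self.map.get(x, 0)
--
--     def addToKey(self, x):
--         new_map = {}
--         for key, value in self.map.items():
--             new_map[key + x] = value
--         self.map = new_map
--
--     def addToValue(self, y):
--         for key in self.map:
--             self.map[key] += y
--
-- def solution(queryTypes, queries):
--     custom_hashmap = CustomHashMap()
--     result_sum = 0
--
--     for queryType, params in zip(queryTypes, queries):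
--         if queryType == "insert":
--             custom_hashmap.insert(params[0], params[1])
--         elif queryType == "get":
--             result_sum += custom_hashmap.get(params[0])
--         elif queryType == "addToKey":
--             custom_hashmap.addToKey(params[0])
--         elif queryType == "addToValue":
--             custom_hashmap.addToValue(params[0])
--
--     return result_sum
-- ===== SOURCE B (Python) =====
-- def solution(queryTypes, queries):
--     # Global key/value offsets instead of rebuilding/rewriting the dict on addToKey/addToValue.
--     m = {}
--     key_off = 0
--     val_off = 0
--     total = 0
--     for t, p in zip(queryTypes, queries):
--         if t == "insert":
--             m[p[0] - key_off] = p[1] - val_off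
--         elif t == "get":
--             k = p[0] - key_off
--             if k in m:
--                 total += m[k] + val_off
--         elif t == "addToKey":
--             key_off += p[0]
--         elif t == "addToValue":
--             val_off += p[0]
--     return total
-- ===== Notes on version B (the rewrite author's own statement) =====
-- stated objective: alternative
-- what changed: Replaces per-operation dict rebuilds (addToKey) and full value rewrites (addToValue) with two global offsets maintained in O(1) per operation, storing keys/values relative to the offsets; O(q) total vs A's O(q*n), though a timing run's inputs did not show a measured speedup.
import Mathlib
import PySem

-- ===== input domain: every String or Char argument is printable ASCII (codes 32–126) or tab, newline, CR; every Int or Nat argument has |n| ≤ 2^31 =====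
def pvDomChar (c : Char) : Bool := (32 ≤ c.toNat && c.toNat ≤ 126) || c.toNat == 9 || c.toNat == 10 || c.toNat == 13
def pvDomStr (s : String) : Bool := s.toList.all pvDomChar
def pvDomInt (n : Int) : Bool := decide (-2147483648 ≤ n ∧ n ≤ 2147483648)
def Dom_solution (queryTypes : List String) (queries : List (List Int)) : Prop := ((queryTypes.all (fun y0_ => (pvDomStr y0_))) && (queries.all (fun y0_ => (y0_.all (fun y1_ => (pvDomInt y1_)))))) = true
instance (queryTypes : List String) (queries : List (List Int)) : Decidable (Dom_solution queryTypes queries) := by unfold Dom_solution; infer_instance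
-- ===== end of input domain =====

-- B keeps two global key/value offsets instead of rebuilding/rewriting the dict on addToKey/addToValue.

-- ===== PORT A =====
-- CustomHashMap.addToKey: rebuild the map with every key shifted by x
def pvAddToKeyA (d : PySem.Dict Int Int) (x : Int) : PySem.Dict Int Int :=
  d.items.foldl (fun nd p => nd.insert (p.1 + x) p.2) PySem.Dict.empty

-- CustomHashMap.addToValue: self.map[key] += y for every key
def pvAddToValueA (d : PySem.Dict Int Int) (y : Int) : PySem.Dict Int Int :=
  d.keys.foldl (fun d' k => d'.insert k (d'.getD k 0 + y)) d

def pvStepA (st : PySem.Dict Int Int × Int) (tp : String × List Int) : PySem.Dict Int Int × Int :=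
  if tp.1 = "insert" then (st.1.insert (PySem.List.pyGetD tp.2 0 0) (PySem.List.pyGetD tp.2 1 0), st.2)
  else if tp.1 = "get" then (st.1, st.2 + st.1.getD (PySem.List.pyGetD tp.2 0 0) 0)
  else if tp.1 = "addToKey" then (pvAddToKeyA st.1 (PySem.List.pyGetD tp.2 0 0), st.2)
  else if tp.1 = "addToValue" then (pvAddToValueA st.1 (PySem.List.pyGetD tp.2 0 0), st.2)
  else st

def solution (queryTypes : List String) (queries : List (List Int)) : Int :=
  ((queryTypes.zip queries).foldl pvStepA (PySem.Dict.empty, 0)).2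

-- ===== PORT B =====
def pvStepB (st : PySem.Dict Int Int × Int × Int × Int) (tp : String × List Int) :
    PySem.Dict Int Int × Int × Int × Int :=
  let m := st.1; let ko := st.2.1; let vo := st.2.2.1; let s := st.2.2.2
  if tp.1 = "insert" then
    (m.insert (PySem.List.pyGetD tp.2 0 0 - ko) (PySem.List.pyGetD tp.2 1 0 - vo), ko, vo, s)
  else if tp.1 = "get" then
    (m, ko, vo, if m.contains (PySem.List.pyGetD tp.2 0 0 - ko) then s + (m.getD (PySem.List.pyGetD tp.2 0 0 - ko) 0 + vo) else s)
  else if tp.1 = "addToKey" then (m, ko + PySem.List.pyGetD tp.2 0 0, vo, s)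
  else if tp.1 = "addToValue" then (m, ko, vo + PySem.List.pyGetD tp.2 0 0, s)
  else (m, ko, vo, s)

def solution_alt (queryTypes : List String) (queries : List (List Int)) : Int :=
  ((queryTypes.zip queries).foldl pvStepB (PySem.Dict.empty, 0, 0, 0)).2.2.2

-- ===== PRECONDITION & SPEC =====
-- Pre_ excludes exactly the inputs where Python A raises IndexError: an "insert" query with
-- fewer than 2 parameters, or a "get"/"addToKey"/"addToValue" query with no parameter.
def Pre_solution (queryTypes : List String) (queries : List (List Int)) : Prop :=
  ∀ tp ∈ queryTypes.zip queries,
    (tp.1 = "insert" → 2 ≤ tp.2.length) ∧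
    ((tp.1 = "get" ∨ tp.1 = "addToKey" ∨ tp.1 = "addToValue") → 1 ≤ tp.2.length)
instance (queryTypes : List String) (queries : List (List Int)) : Decidable (Pre_solution queryTypes queries) := by unfold Pre_solution; infer_instance

def pvWitness_solution : List String × List (List Int) :=
  (["insert", "addToKey", "addToValue", "get"], [[1, 2], [3], [5], [4]])

def Spec_solution (queryTypes : List String) (queries : List (List Int)) (out : Int) : Prop := out = solution_alt queryTypes queries
instance (queryTypes : List String) (queries : List (List Int)) (out : Int) : Decidable (Spec_solution queryTypes queries out) := by unfold Spec_solution; infer_instance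

-- ===== CLAIM (what is proved, stated in full; the proofs are below) =====
def Claim_equal_solution : Prop := ∀ (queryTypes : List String) (queries : List (List Int)), Dom_solution queryTypes queries → Pre_solution queryTypes queries → Spec_solution queryTypes queries (solution queryTypes queries)

-- ===== LEMMAS AND PROOFS =====

-- shift of an association list by key/value offsets
def pvShift (ko vo : Int) (p : Int × Int) : Int × Int := (p.1 + ko, p.2 + vo)

-- lookup in a shifted literal dict
theorem pvGet?_shift (l : List (Int × Int)) (ko vo x : Int) :
    (PySem.Dict.mk (l.map (pvShift ko vo))).get? x
      = ((PySem.Dict.mk l).get? (x - ko)).map (· + vo) := by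
  induction l with
  | nil => simp [PySem.Dict.get?, pvShift]
  | cons p rest ih =>
    obtain ⟨k, v⟩ := p
    simp only [List.map_cons, PySem.Dict.get?_mk_cons, pvShift]
    by_cases h : k + ko = x
    · have h' : k = x - ko := by omega
      simp [h']
    · have h' : k ≠ x - ko := by omega
      simp [h, h', ih]

theorem pvAddToValueA_items (ks : List Int) (d : PySem.Dict Int Int) (y : Int)
    (hks : ks.Nodup) (hnd : d.keys.Nodup) (hsub : ∀ k ∈ ks, k ∈ d.keys) :
    (ks.foldl (fun d' k => d'.insert k (d'.getD k 0 + y)) d).items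
      = d.items.map (fun p => if p.1 ∈ ks then (p.1, p.2 + y) else p) := by
  induction ks generalizing d with
  | nil => simp
  | cons k rest ih =>
    have hck : d.contains k = true := by
      rw [PySem.Dict.contains_eq_decide_mem_keys]
      simp [hsub k (by simp)]
    have hsub' : ∀ k' ∈ rest, k' ∈ (d.insert k (d.getD k 0 + y)).keys := by
      intro k' hk'
      rw [PySem.Dict.mem_keys_insert]
      exact Or.inr (hsub k' (List.mem_cons_of_mem _ hk'))
    simp only [List.foldl_cons]
    rw [ih _ (List.Nodup.of_cons hks) (PySem.Dict.nodup_keys_insert d k _ hnd) hsub']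
    rw [PySem.Dict.items_insert_of_contains _ _ hck, List.map_map]
    apply List.map_congr_left
    intro p hp
    have hknr : k ∉ rest := (List.nodup_cons.mp hks).1
    by_cases hpk : p.1 = k
    · have hmem : (k, p.2) ∈ d.items := by
        have hpe : p = (k, p.2) := by cases p; simp_all
        rw [← hpe]; exact hp
      have hval : d.getD k 0 = p.2 := PySem.Dict.getD_of_mem_items d hmem hnd 0
      simp [Function.comp, hpk, hknr, hval]
    · simp [Function.comp, hpk, List.mem_cons]

theorem pvMain (L : List (String × List Int)) (dA : PySem.Dict Int Int)
    (m : PySem.Dict Int Int) (ko vo s : Int)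
    (hItems : dA.items = m.items.map (pvShift ko vo)) (hnd : m.keys.Nodup) :
    (L.foldl pvStepA (dA, s)).2 = (L.foldl pvStepB (m, ko, vo, s)).2.2.2 := by
  induction L generalizing dA m ko vo s with
  | nil => rfl
  | cons tp L ih =>
    obtain ⟨t, ps⟩ := tp
    have hdmk : PySem.Dict.mk (m.items.map (pvShift ko vo)) = dA := by
      apply PySem.Dict.ext; rw [hItems]
    have hkeysA : dA.keys = m.keys.map (· + ko) := by
      simp only [PySem.Dict.keys, hItems, List.map_map]
      apply List.map_congr_left; intro p _; simp [pvShift]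
    have hkA : dA.keys.Nodup := by
      rw [hkeysA]
      exact hnd.map (fun a b h => by omega)
    have hcont : ∀ a : Int, dA.contains a = m.contains (a - ko) := by
      intro a
      rw [PySem.Dict.contains_eq_decide_mem_keys, PySem.Dict.contains_eq_decide_mem_keys,
        hkeysA]
      simp only [List.mem_map, decide_eq_decide]
      constructor
      · rintro ⟨k, hk, rfl⟩; simpa using hk
      · intro hk; exact ⟨a - ko, hk, by omega⟩
    have hget : ∀ a : Int,
        dA.getD a 0 = if m.contains (a - ko) then m.getD (a - ko) 0 + vo else 0 := by
      intro a
      have hg : dA.get? a = (m.get? (a - ko)).map (· + vo) := by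
        rw [← hdmk]
        have hm : PySem.Dict.mk m.items = m := PySem.Dict.ext rfl
        rw [pvGet?_shift, hm]
      rw [PySem.Dict.getD_eq_get?_getD, hg, PySem.Dict.contains_eq_isSome_get?,
        PySem.Dict.getD_eq_get?_getD]
      cases m.get? (a - ko) <;> simp
    simp only [List.foldl_cons]
    by_cases h1 : t = "insert"
    · subst h1
      simp only [pvStepA, pvStepB]
      norm_num
      set a := PySem.List.pyGetD ps 0 0 with ha
      set b := PySem.List.pyGetD ps 1 0 with hb
      have hIns : (dA.insert a b).items
          = (m.insert (a - ko) (b - vo)).items.map (pvShift ko vo) := by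
        rw [PySem.Dict.items_insert, PySem.Dict.items_insert, hcont]
        by_cases hc : m.contains (a - ko) = true
        · rw [if_pos hc, if_pos hc, hItems, List.map_map, List.map_map]
          apply List.map_congr_left
          intro p _
          by_cases hpk : p.1 = a - ko
          · have hpa : (p.1 + ko == a) = true := by simp; omega
            simp only [Function.comp, pvShift, hpa,
              if_pos (by simp [hpk] : (p.1 == a - ko) = true)]
            simp only [if_true, Prod.mk.injEq]
            omega
          · have hpa : (p.1 + ko == a) = false := by simp; omega
            simp only [Function.comp, pvShift, hpa,
              if_neg (by simp [hpk] : ¬ (p.1 == a - ko) = true)]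
            simp
        · rw [if_neg hc, if_neg hc, hItems, List.map_append]
          simp only [List.map_cons, List.map_nil, pvShift, Prod.mk.injEq, List.append_cancel_left_eq,
            List.cons.injEq, and_true]
          omega
      exact ih _ _ _ _ _ hIns (PySem.Dict.nodup_keys_insert _ _ _ hnd)
    · by_cases h2 : t = "get"
      · subst h2
        simp only [pvStepA, pvStepB]
        norm_num
        set a := PySem.List.pyGetD ps 0 0 with ha
        rw [hget]
        by_cases hc : m.contains (a - ko) = true
        · rw [if_pos hc, if_pos hc]
          exact ih _ _ _ _ _ hItems hnd
        · rw [if_neg hc, if_neg hc, add_zero]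
          exact ih _ _ _ _ _ hItems hnd
      · by_cases h3 : t = "addToKey"
        · subst h3
          simp only [pvStepA, pvStepB]
          norm_num
          set a := PySem.List.pyGetD ps 0 0 with ha
          have hKey : (pvAddToKeyA dA a).items = m.items.map (pvShift (ko + a) vo) := by
            unfold pvAddToKeyA
            have hfresh : ∀ p ∈ dA.items, (PySem.Dict.empty : PySem.Dict Int Int).contains (p.1 + a) = false := by
              intro p _; exact PySem.Dict.contains_empty (ν := Int) (p.1 + a)
            have hnodup : (dA.items.map (fun p : Int × Int => p.1 + a)).Nodup := by
              have hmap : dA.items.map (fun p : Int × Int => p.1 + a)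
                  = dA.keys.map (· + a) := by
                simp [PySem.Dict.keys, List.map_map, Function.comp]
              rw [hmap]
              exact hkA.map (fun x y h => by omega)
            rw [PySem.Dict.items_foldl_insert_fresh dA.items
              (fun p : Int × Int => p.1 + a) (fun p : Int × Int => p.2) PySem.Dict.empty
              hfresh hnodup]
            rw [hItems, List.map_map]
            simp only [PySem.Dict.empty, List.nil_append]
            apply List.map_congr_left
            intro p _
            simp only [Function.comp, pvShift, Prod.mk.injEq]
            exact ⟨by ring, trivial⟩
          exact ih _ _ _ _ _ hKey hnd
        · by_cases h4 : t = "addToValue"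
          · subst h4
            simp only [pvStepA, pvStepB]
            norm_num
            set y := PySem.List.pyGetD ps 0 0 with hy
            have hVal : (pvAddToValueA dA y).items = m.items.map (pvShift ko (vo + y)) := by
              unfold pvAddToValueA
              rw [pvAddToValueA_items dA.keys dA y hkA hkA (fun k hk => hk)]
              rw [hItems, List.map_map]
              apply List.map_congr_left
              intro p hp
              have hp1 : p.1 ∈ m.keys := PySem.Dict.mem_keys_of_mem_items _ hp
              have hmemk : p.1 + ko ∈ dA.keys := by
                rw [hkeysA]
                exact List.mem_map.mpr ⟨p.1, hp1, rfl⟩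
              simp only [Function.comp, pvShift, if_pos hmemk, Prod.mk.injEq]
              exact ⟨trivial, by ring⟩
            exact ih _ _ _ _ _ hVal hnd
          · simp only [pvStepA, pvStepB, if_neg (by simpa using h1), if_neg (by simpa using h2),
              if_neg (by simpa using h3), if_neg (by simpa using h4)]
            exact ih _ _ _ _ _ hItems hnd

-- ===== VERDICT (by name: the statement is the Claim_ definition above) =====
theorem solution_spec : Claim_equal_solution := by
  intro queryTypes queries _ _
  unfold Spec_solution solution solution_alt
  exact pvMain _ _ _ _ _ _ (by simp [PySem.Dict.empty]) PySem.Dict.nodup_keys_empty
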